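-- pv_equiv track=rewrite | github.com/amshrestha2020/CodeSignal | CodeSignal/Core/Lineup.py | solution
-- ===== SOURCE A (Python) =====
-- def solution(commands):
--     count = 0
--     smart_student = 0
--     dumb_student = 0
--     for command in commands:
--         if command == 'L':
--             smart_student = (smart_student - 1) % 4
--             dumb_student = (dumb_student + 1) % 4
--         elif command == 'R':
--             smart_student = (smart_student + 1) % 4
--             dumb_student = (dumb_student - 1) % 4
--         elif command == 'A':
--             smart_student = (smart_student + 2) % 4
--             dumb_student = (dumb_student + 2) % 4
--
--         if smart_student == dumb_student:
--             count += 1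
--     return count
-- ===== SOURCE B (Python) =====
-- def solution(commands):
--     # Alignment depends only on (smart - dumb) % 4: 'L' and 'R' each shift it
--     # by ∓2 ≡ +2 (mod 4), i.e. toggle alignment; 'A' leaves it fixed.
--     count = 0
--     aligned = True
--     for command in commands:
--         if command == 'L' or command == 'R':
--             aligned = not aligned
--         if aligned:
--             count += 1
--     return count
-- ===== Notes on version B (the rewrite author's own statement) =====
-- stated objective: simpler
-- what changed: B replaces the two mod-4 rotating positions by a single boolean 'aligned' that is toggled by 'L' or 'R' (since both shift the difference by 2 mod 4) and untouched by 'A', counting whenever it is true.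
import Mathlib
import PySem

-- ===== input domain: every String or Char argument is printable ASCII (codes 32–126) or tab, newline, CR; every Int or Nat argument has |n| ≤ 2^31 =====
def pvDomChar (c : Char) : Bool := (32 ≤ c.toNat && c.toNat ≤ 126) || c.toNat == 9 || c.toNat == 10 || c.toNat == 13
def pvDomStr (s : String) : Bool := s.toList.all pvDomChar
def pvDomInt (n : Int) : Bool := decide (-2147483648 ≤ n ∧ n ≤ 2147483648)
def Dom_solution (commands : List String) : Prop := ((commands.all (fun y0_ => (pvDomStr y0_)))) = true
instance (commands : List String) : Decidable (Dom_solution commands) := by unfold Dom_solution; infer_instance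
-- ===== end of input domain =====

-- B maintains a single alignment boolean toggled by 'L'/'R' instead of A's two mod-4 positions; objective: simpler.


-- ===== PORT A =====
def stepA (st : Int × Int × Int) (command : String) : Int × Int × Int :=
  let (count, smart, dumb) := st
  let (smart, dumb) :=
    if command = "L" then (PySem.Int.mod (smart - 1) 4, PySem.Int.mod (dumb + 1) 4)
    else if command = "R" then (PySem.Int.mod (smart + 1) 4, PySem.Int.mod (dumb - 1) 4)
    else if command = "A" then (PySem.Int.mod (smart + 2) 4, PySem.Int.mod (dumb + 2) 4)
    else (smart, dumb)
  if smart = dumb then (count + 1, smart, dumb) else (count, smart, dumb)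

def solution (commands : List String) : Int :=
  (commands.foldl stepA (0, 0, 0)).1

-- ===== PORT B =====
def stepB (st : Int × Bool) (command : String) : Int × Bool :=
  let (count, aligned) := st
  let aligned := if command = "L" ∨ command = "R" then !aligned else aligned
  (if aligned then count + 1 else count, aligned)

def solution_alt (commands : List String) : Int :=
  (commands.foldl stepB (0, true)).1

-- ===== PRECONDITION & SPEC =====
def Spec_solution (commands : List String) (out : Int) : Prop := out = solution_alt commands
instance (commands : List String) (out : Int) : Decidable (Spec_solution commands out) := by unfold Spec_solution; infer_instance

-- ===== CLAIM (what is proved, stated in full; the proofs are below) =====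
def Claim_equal_solution : Prop := ∀ (commands : List String), Dom_solution commands → Spec_solution commands (solution commands)

-- ===== LEMMAS AND PROOFS =====

-- invariant linking A's (smart, dumb) state to B's boolean
def AlignInv (smart dumb : Int) (aligned : Bool) : Prop :=
  (smart, dumb, aligned) = (0, 0, true) ∨ (smart, dumb, aligned) = (1, 3, false) ∨
  (smart, dumb, aligned) = (2, 2, true) ∨ (smart, dumb, aligned) = (3, 1, false)

theorem fold_eq (cs : List String) (count smart dumb : Int) (aligned : Bool)
    (h : AlignInv smart dumb aligned) :
    (cs.foldl stepA (count, smart, dumb)).1 = (cs.foldl stepB (count, aligned)).1 := by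
  induction cs generalizing count smart dumb aligned with
  | nil => rfl
  | cons c cs ih =>
    simp only [List.foldl_cons]
    by_cases hL : c = "L" <;> by_cases hR : c = "R" <;> by_cases hA : c = "A" <;>
      rcases h with h | h | h | h <;>
      simp_all only [stepA, stepB, Prod.mk.injEq] <;>
      obtain ⟨h1, h2, h3⟩ := h <;> subst h1 <;> subst h2 <;> subst h3 <;>
      simp only [if_pos, true_or, or_true, or_self, if_false,
        Bool.not_true, Bool.not_false] <;>
      (apply ih; unfold AlignInv; decide)

-- ===== VERDICT (by name: the statement is the Claim_ definition above) =====
theorem solution_spec : Claim_equal_solution := by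
  intro commands _
  show solution commands = solution_alt commands
  exact fold_eq commands 0 0 0 true (Or.inl rfl)
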